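-- pv_equiv track=rewrite | github.com/zariuq/ai-agents | megalodon/ramsey36/gen_adj17_nonedge_and_paths.py | gen_inner_j_or_elim
-- ===== SOURCE A (Python) =====
-- def get_neq_lemma(a, b):
--     """Return (lemma_name, orientation_matches_eq?).
--
--     The bundled neq_lemmas.mg supplies neq_{n}_{m} lemmas with the **larger
--     numeral first** (e.g., neq_14_1 instead of neq_1_14). To avoid missing
--     lemmas we always pick that orientation and track whether it already matches
--     the assumed equality direction.
--     """
--
--     if a >= b:
--         return f"neq_{a}_{b}", True
--     return f"neq_{b}_{a}", False
--
-- BULLETS = ["-", "+", "*"]  # reused cyclically at different nesting levels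
--
-- def gen_eq_contra(x, y, eq_name, indent=""):
--     """Discharge an impossible equality using the oriented neq_* lemma.
--
--     If the lemma orientation matches the assumption, we apply it directly.
--     Otherwise, we synthesize the symmetric equality via rewriting and feed
--     that to the available lemma.
--     """
--
--     lemma, oriented = get_neq_lemma(x, y)
--     if oriented:
--         return [f"{indent}exact {lemma} {eq_name}."]
--
--     return [
--         f"{indent}have Hsym: {max(x, y)} = {min(x, y)}.",
--         f"{indent}  rewrite {eq_name}.",
--         f"{indent}  reflexivity.",
--         f"{indent}exact {lemma} Hsym.",
--     ]
--
-- def gen_inner_j_or_elim(vertex_j, neighbors, indent="", level=0):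
--     """
--     Generate elimination of a left-associative disjunction
--
--       (j = n0 \/ j = n1 \/ ... \/ j = nk)
--
--     encoded as (((j=n0 \/ j=n1) \/ ...) \/ j=nk).
--
--     We assume we are *after* writing:
--
--       assume Hj.
--       apply Hj.
--
--     So Hj has type "that disjunction", and we now produce branches.
--     """
--     lines = []
--     bullet = BULLETS[level % len(BULLETS)]
--
--     if len(neighbors) == 1:
--         n = neighbors[0]
--         # Base case: j = n -> False
--         lines.append(f"{indent}{bullet} assume Heq: {vertex_j} = {n}.")
--         lines.extend(gen_eq_contra(vertex_j, n, "Heq", indent + "  "))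
--         return lines
--
--     # Recursive case: split into left (all but last) and right (last)
--     left = neighbors[:-1]
--     right = neighbors[-1]
--
--     # Left: nested disjunction of all but last neighbor
--     lines.append(f"{indent}{bullet} assume Hleft.")
--     lines.append(f"{indent}  apply Hleft.")
--     lines.extend(gen_inner_j_or_elim(vertex_j, left, indent + "  ", level + 1))
--
--     # Right: final neighbor
--     lines.append(f"{indent}{bullet} assume Heq: {vertex_j} = {right}.")
--     lines.extend(gen_eq_contra(vertex_j, right, "Heq", indent + "  "))
--
--     return lines
-- ===== SOURCE B (Python) =====
-- BULLETS = ["-", "+", "*"]  # reused cyclically at different nesting levels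
--
-- def _bullet(level):
--     return BULLETS[level % 3]
--
-- def _contra(j, m, pad):
--     # neq lemmas always name the larger numeral first
--     if j >= m:
--         return [f"{pad}exact neq_{j}_{m} Heq."]
--     return [
--         f"{pad}have Hsym: {m} = {j}.",
--         f"{pad}  rewrite Heq.",
--         f"{pad}  reflexivity.",
--         f"{pad}exact neq_{m}_{j} Hsym.",
--     ]
--
-- def gen_inner_j_or_elim(vertex_j, neighbors, indent="", level=0):
--     """Iterative form: descend the left spine of the disjunction, emit the
--     deepest (first-neighbor) branch, then emit the right branches on the
--     way back up."""
--     n = len(neighbors)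
--     lines = []
--     for k in range(n - 1):
--         pad = indent + "  " * k
--         lines.append(f"{pad}{_bullet(level + k)} assume Hleft.")
--         lines.append(f"{pad}  apply Hleft.")
--     deep = indent + "  " * (n - 1)
--     lines.append(f"{deep}{_bullet(level + n - 1)} assume Heq: {vertex_j} = {neighbors[0]}.")
--     lines.extend(_contra(vertex_j, neighbors[0], deep + "  "))
--     for k in reversed(range(n - 1)):
--         pad = indent + "  " * k
--         m = neighbors[n - 1 - k]
--         lines.append(f"{pad}{_bullet(level + k)} assume Heq: {vertex_j} = {m}.")
--         lines.extend(_contra(vertex_j, m, pad + "  "))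
--     return lines
-- ===== Notes on version B (the rewrite author's own statement) =====
-- stated objective: faster
-- what changed: Replaces A's recursion on neighbors[:-1] by an explicit iterative form: one loop down the disjunction spine emitting the assume/apply pairs, the deepest branch for neighbors[0], then a reversed index loop emitting the right branches on the way back up.
import Mathlib
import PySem

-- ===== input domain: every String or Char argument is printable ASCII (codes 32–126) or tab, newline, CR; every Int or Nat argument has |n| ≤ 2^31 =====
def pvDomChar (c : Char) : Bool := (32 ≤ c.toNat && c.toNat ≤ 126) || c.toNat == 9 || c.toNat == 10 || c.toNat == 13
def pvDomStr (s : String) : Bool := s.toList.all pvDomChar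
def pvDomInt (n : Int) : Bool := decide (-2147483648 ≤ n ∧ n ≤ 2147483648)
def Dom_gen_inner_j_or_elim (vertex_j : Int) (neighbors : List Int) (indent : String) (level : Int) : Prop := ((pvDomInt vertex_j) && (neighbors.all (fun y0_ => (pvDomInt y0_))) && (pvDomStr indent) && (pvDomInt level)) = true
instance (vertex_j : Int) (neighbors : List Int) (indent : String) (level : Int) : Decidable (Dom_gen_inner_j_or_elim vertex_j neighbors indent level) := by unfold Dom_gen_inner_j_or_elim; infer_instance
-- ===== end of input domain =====

-- B replaces A's recursion on neighbors[:-1] by two explicit index loops (down the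
-- spine, then back up), same output; equivalence is about the return value only.

-- ===== PORT A =====
-- module-level constant BULLETS (shared by the Python module)
def pyBULLETS : List String := ["-", "+", "*"]

def get_neq_lemma (a b : Int) : String × Bool :=
  if a ≥ b then ("neq_" ++ PySem.Int.toStr a ++ "_" ++ PySem.Int.toStr b, true)
  else ("neq_" ++ PySem.Int.toStr b ++ "_" ++ PySem.Int.toStr a, false)

def gen_eq_contra (x y : Int) (eq_name : String) (indent : String) : List String :=
  let p := get_neq_lemma x y
  if p.2 then
    [indent ++ "exact " ++ p.1 ++ " " ++ eq_name ++ "."]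
  else
    [indent ++ "have Hsym: " ++ PySem.Int.toStr (max x y) ++ " = " ++ PySem.Int.toStr (min x y) ++ ".",
     indent ++ "  rewrite " ++ eq_name ++ ".",
     indent ++ "  reflexivity.",
     indent ++ "exact " ++ p.1 ++ " Hsym."]

def gen_inner_j_or_elim (vertex_j : Int) (neighbors : List Int) (indent : String) (level : Int) : List String :=
  -- BULLETS[level % 3]: the index is always in range (0 ≤ level % 3 < 3), default never used
  let bullet := PySem.List.pyGetD pyBULLETS (PySem.Int.mod level 3) ""
  if neighbors.length = 1 then
    -- neighbors[0]: in range since len(neighbors) = 1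
    let n := PySem.List.pyGetD neighbors 0 0
    (indent ++ bullet ++ " assume Heq: " ++ PySem.Int.toStr vertex_j ++ " = " ++ PySem.Int.toStr n ++ ".")
      :: gen_eq_contra vertex_j n "Heq" (indent ++ "  ")
  else
    match h : PySem.List.pyGet? neighbors (-1) with
    | none => []   -- Python raises IndexError here (neighbors = []); excluded by Pre_
    | some right =>
      let left := PySem.List.slice neighbors none (some (-1))   -- neighbors[:-1]
      [indent ++ bullet ++ " assume Hleft.",
       indent ++ "  apply Hleft."]
      ++ gen_inner_j_or_elim vertex_j left (indent ++ "  ") (level + 1)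
      ++ ((indent ++ bullet ++ " assume Heq: " ++ PySem.Int.toStr vertex_j ++ " = " ++ PySem.Int.toStr right ++ ".")
          :: gen_eq_contra vertex_j right "Heq" (indent ++ "  "))
termination_by neighbors.length
decreasing_by
  have hne : neighbors ≠ [] := by
    rintro rfl; simp [PySem.List.pyGet?] at h
  simp only [PySem.List.slice_to_neg_one, List.length_dropLast]
  have : 0 < neighbors.length := List.length_pos_iff.mpr hne
  omega

-- ===== PORT B =====
def bulletAlt (level : Int) : String :=
  -- BULLETS[level % 3]: always in range, default never used
  PySem.List.pyGetD pyBULLETS (PySem.Int.mod level 3) ""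

def contraAlt (j m : Int) (pad : String) : List String :=
  if j ≥ m then
    [pad ++ "exact neq_" ++ PySem.Int.toStr j ++ "_" ++ PySem.Int.toStr m ++ " Heq."]
  else
    [pad ++ "have Hsym: " ++ PySem.Int.toStr m ++ " = " ++ PySem.Int.toStr j ++ ".",
     pad ++ "  rewrite Heq.",
     pad ++ "  reflexivity.",
     pad ++ "exact neq_" ++ PySem.Int.toStr m ++ "_" ++ PySem.Int.toStr j ++ " Hsym."]

def rep2 (k : Int) : String := String.ofList (PySem.List.pyRepeat [' ', ' '] k)   -- "  " * k

def gen_inner_j_or_elim_alt (vertex_j : Int) (neighbors : List Int) (indent : String) (level : Int) : List String :=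
  let n : Int := neighbors.length
  let lines1 := (PySem.List.pyRange 0 (n - 1) 1).foldl (fun acc k =>
      let pad := indent ++ rep2 k
      acc ++ [pad ++ bulletAlt (level + k) ++ " assume Hleft.",
              pad ++ "  apply Hleft."]) []
  let deep := indent ++ rep2 (n - 1)
  -- neighbors[0]: IndexError on the empty list, excluded by Pre_
  let first := PySem.List.pyGetD neighbors 0 0
  let lines2 := lines1
      ++ ((deep ++ bulletAlt (level + n - 1) ++ " assume Heq: " ++ PySem.Int.toStr vertex_j ++ " = " ++ PySem.Int.toStr first ++ ".")
          :: contraAlt vertex_j first (deep ++ "  "))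
  ((PySem.List.pyRange 0 (n - 1) 1).reverse).foldl (fun acc k =>
      let pad := indent ++ rep2 k
      let m := PySem.List.pyGetD neighbors (n - 1 - k) 0
      acc ++ ((pad ++ bulletAlt (level + k) ++ " assume Heq: " ++ PySem.Int.toStr vertex_j ++ " = " ++ PySem.Int.toStr m ++ ".")
              :: contraAlt vertex_j m (pad ++ "  "))) lines2

-- ===== PRECONDITION & SPEC =====
-- Pre_ excludes only the empty neighbor list, on which the Python A raises IndexError.
def Pre_gen_inner_j_or_elim (vertex_j : Int) (neighbors : List Int) (indent : String) (level : Int) : Prop :=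
  neighbors ≠ []
instance (vertex_j : Int) (neighbors : List Int) (indent : String) (level : Int) : Decidable (Pre_gen_inner_j_or_elim vertex_j neighbors indent level) := by unfold Pre_gen_inner_j_or_elim; infer_instance

def pvWitness_gen_inner_j_or_elim : Int × List Int × String × Int := (2, [3, 5, 7], "  ", 0)

def Spec_gen_inner_j_or_elim (vertex_j : Int) (neighbors : List Int) (indent : String) (level : Int) (out : List String) : Prop := out = gen_inner_j_or_elim_alt vertex_j neighbors indent level
instance (vertex_j : Int) (neighbors : List Int) (indent : String) (level : Int) (out : List String) : Decidable (Spec_gen_inner_j_or_elim vertex_j neighbors indent level out) := by unfold Spec_gen_inner_j_or_elim; infer_instance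

-- ===== CLAIM (what is proved, stated in full; the proofs are below) =====
def Claim_equal_gen_inner_j_or_elim : Prop := ∀ (vertex_j : Int) (neighbors : List Int) (indent : String) (level : Int), Dom_gen_inner_j_or_elim vertex_j neighbors indent level → Pre_gen_inner_j_or_elim vertex_j neighbors indent level → Spec_gen_inner_j_or_elim vertex_j neighbors indent level (gen_inner_j_or_elim vertex_j neighbors indent level)

-- ===== LEMMAS AND PROOFS =====

-- the two gen_eq_contra transliterations agree (max/min collapse by the branch test)
theorem contra_eq (x y : Int) (pad : String) :
    gen_eq_contra x y "Heq" pad = contraAlt x y pad := by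
  unfold gen_eq_contra get_neq_lemma contraAlt
  by_cases h : x >= y
  · simp only [h, if_pos]
    apply congrArg (fun s => [s])
    apply String.toList_inj.mp
    simp [String.toList_append]
  · simp [h, max_eq_right (le_of_not_ge h), min_eq_left (le_of_not_ge h)]
    refine ⟨?_, ?_⟩ <;> (apply String.toList_inj.mp; simp [String.toList_append])

theorem rep2_zero : rep2 (0 : Int) = "" := by
  simp [rep2, PySem.List.pyRepeat]

theorem rep2_succ (k : Nat) : rep2 ((k + 1 : Nat) : Int) = "  " ++ rep2 ((k : Nat) : Int) := by
  apply String.toList_inj.mp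
  simp [rep2, PySem.List.pyRepeat, List.replicate_succ, String.toList_append]

-- closed form of the B port: the two index loops as flatMaps over List.range
theorem alt_eq (j : Int) (nb : List Int) (ind : String) (lvl : Int) (h : nb ≠ []) :
    gen_inner_j_or_elim_alt j nb ind lvl =
      (List.range (nb.length - 1)).flatMap (fun (k : Nat) =>
        [ind ++ rep2 (k : Int) ++ bulletAlt (lvl + (k : Int)) ++ " assume Hleft.",
         ind ++ rep2 (k : Int) ++ "  apply Hleft."])
      ++ ((ind ++ rep2 ((nb.length - 1 : Nat) : Int) ++ bulletAlt (lvl + (nb.length : Int) - 1)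
            ++ " assume Heq: " ++ PySem.Int.toStr j ++ " = " ++ PySem.Int.toStr (PySem.List.pyGetD nb 0 0) ++ ".")
          :: contraAlt j (PySem.List.pyGetD nb 0 0) (ind ++ rep2 ((nb.length - 1 : Nat) : Int) ++ "  "))
      ++ (List.range (nb.length - 1)).reverse.flatMap (fun (k : Nat) =>
          (ind ++ rep2 (k : Int) ++ bulletAlt (lvl + (k : Int)) ++ " assume Heq: "
             ++ PySem.Int.toStr j ++ " = "
             ++ PySem.Int.toStr (PySem.List.pyGetD nb (((nb.length - 1 : Nat) : Int) - (k : Int)) 0) ++ ".")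
           :: contraAlt j (PySem.List.pyGetD nb (((nb.length - 1 : Nat) : Int) - (k : Int)) 0)
               (ind ++ rep2 (k : Int) ++ "  ")) := by
  have hpos : 0 < nb.length := List.length_pos_iff.mpr h
  have hc : ((nb.length : Int) - 1) = ((nb.length - 1 : Nat) : Int) := by push_cast [hpos]; omega
  simp only [gen_inner_j_or_elim_alt]
  rw [hc, PySem.List.pyRange_zero_natCast,
      PySem.List.foldl_append_eq_flatMap
        (g := fun k => [ind ++ rep2 k ++ bulletAlt (lvl + k) ++ " assume Hleft.",
                        ind ++ rep2 k ++ "  apply Hleft."]),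
      PySem.List.foldl_append_eq_flatMap
        (g := fun k =>
          (ind ++ rep2 k ++ bulletAlt (lvl + k) ++ " assume Heq: " ++ PySem.Int.toStr j ++ " = "
             ++ PySem.Int.toStr (PySem.List.pyGetD nb (((nb.length - 1 : Nat) : Int) - k) 0) ++ ".")
           :: contraAlt j (PySem.List.pyGetD nb (((nb.length - 1 : Nat) : Int) - k) 0)
               (ind ++ rep2 k ++ "  "))]
  rw [← List.map_reverse, List.flatMap_map, List.flatMap_map]
  simp only [List.cons_append, List.append_assoc, List.nil_append]

theorem alt_single (j r : Int) (ind : String) (lvl : Int) :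
    gen_inner_j_or_elim_alt j [r] ind lvl =
      (ind ++ bulletAlt lvl ++ " assume Heq: " ++ PySem.Int.toStr j ++ " = " ++ PySem.Int.toStr r ++ ".")
        :: contraAlt j r (ind ++ "  ") := by
  rw [alt_eq j [r] ind lvl (by simp)]
  simp [rep2_zero, String.append_empty, PySem.List.pyGetD_zero_cons]

theorem spineL (ind : String) (lvl : Int) (L : Nat) :
    (List.range (L + 1)).flatMap (fun (k : Nat) =>
        [ind ++ rep2 (k : Int) ++ bulletAlt (lvl + (k : Int)) ++ " assume Hleft.",
         ind ++ rep2 (k : Int) ++ "  apply Hleft."])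
      = [ind ++ bulletAlt lvl ++ " assume Hleft.", ind ++ "  apply Hleft."]
        ++ (List.range L).flatMap (fun (k : Nat) =>
            [(ind ++ "  ") ++ rep2 (k : Int) ++ bulletAlt ((lvl + 1) + (k : Int)) ++ " assume Hleft.",
             (ind ++ "  ") ++ rep2 (k : Int) ++ "  apply Hleft."]) := by
  rw [List.range_succ_eq_map, List.flatMap_cons, List.flatMap_map]
  congr 1
  · simp [rep2_zero, String.append_empty]
  · apply List.flatMap_congr
    intro k hk
    have hb : (lvl + ((k + 1 : Nat) : Int)) = (lvl + 1) + (k : Int) := by push_cast; ring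
    simp only [Nat.succ_eq_add_one, rep2_succ, hb, String.append_assoc]

theorem spineR (j r : Int) (ms : List Int) (ind : String) (lvl : Int) (L : Nat)
    (hL : ms.length = L + 1) :
    (List.range (L + 1)).reverse.flatMap (fun (k : Nat) =>
        (ind ++ rep2 (k : Int) ++ bulletAlt (lvl + (k : Int)) ++ " assume Heq: "
           ++ PySem.Int.toStr j ++ " = "
           ++ PySem.Int.toStr (PySem.List.pyGetD (ms ++ [r]) (((L + 1 : Nat) : Int) - (k : Int)) 0) ++ ".")
         :: contraAlt j (PySem.List.pyGetD (ms ++ [r]) (((L + 1 : Nat) : Int) - (k : Int)) 0)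
             (ind ++ rep2 (k : Int) ++ "  "))
      = (List.range L).reverse.flatMap (fun (k : Nat) =>
          ((ind ++ "  ") ++ rep2 (k : Int) ++ bulletAlt ((lvl + 1) + (k : Int)) ++ " assume Heq: "
             ++ PySem.Int.toStr j ++ " = "
             ++ PySem.Int.toStr (PySem.List.pyGetD ms (((L : Nat) : Int) - (k : Int)) 0) ++ ".")
           :: contraAlt j (PySem.List.pyGetD ms (((L : Nat) : Int) - (k : Int)) 0)
               ((ind ++ "  ") ++ rep2 (k : Int) ++ "  "))
        ++ ((ind ++ bulletAlt lvl ++ " assume Heq: " ++ PySem.Int.toStr j ++ " = " ++ PySem.Int.toStr r ++ ".")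
            :: contraAlt j r (ind ++ "  ")) := by
  rw [List.range_succ_eq_map, List.reverse_cons, List.flatMap_append, ← List.map_reverse,
      List.flatMap_map]
  congr 1
  · apply List.flatMap_congr
    intro k hk
    have hkL : k < L := by simpa using hk
    have hidx : ((L + 1 + 1 : Nat) : Int) - ((k + 1 + 1 : Nat) : Int) = ((L : Nat) : Int) - (k : Int) := by
      push_cast; ring
    have hidx2 : ((L + 1 : Nat) : Int) - ((k + 1 : Nat) : Int) = ((L : Nat) : Int) - (k : Int) := by
      push_cast; ring
    have hlen2 : (ms ++ [r]).length = L + 2 := by simp [hL]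
    have hget : PySem.List.pyGetD (ms ++ [r]) (((L : Nat) : Int) - (k : Int)) 0
        = PySem.List.pyGetD ms (((L : Nat) : Int) - (k : Int)) 0 := by
      rw [PySem.List.pyGetD_eq_getElem _ _ (by omega) (by rw [hlen2]; push_cast; omega),
          PySem.List.pyGetD_eq_getElem _ _ (by omega) (by rw [hL]; push_cast; omega)]
      exact List.getElem_append_left _
    have hb : (lvl + ((k + 1 : Nat) : Int)) = (lvl + 1) + (k : Int) := by push_cast; ring
    simp only [Nat.succ_eq_add_one, rep2_succ, hb, hidx2, hget, String.append_assoc]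
  · have hlen2 : (ms ++ [r]).length = L + 2 := by simp [hL]
    have hget0 : PySem.List.pyGetD (ms ++ [r]) ((L : Int) + 1) 0 = r := by
      rw [PySem.List.pyGetD_eq_getElem _ _ (by omega) (by rw [hlen2]; push_cast; omega)]
      exact List.getElem_concat_length (by omega) _
    simp [rep2_zero, String.append_empty, hget0]

theorem alt_step (j r : Int) (ms : List Int) (ind : String) (lvl : Int) (hms : ms ≠ []) :
    gen_inner_j_or_elim_alt j (ms ++ [r]) ind lvl =
      (ind ++ bulletAlt lvl ++ " assume Hleft.")
        :: (ind ++ "  apply Hleft.")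
        :: (gen_inner_j_or_elim_alt j ms (ind ++ "  ") (lvl + 1)
            ++ ((ind ++ bulletAlt lvl ++ " assume Heq: " ++ PySem.Int.toStr j ++ " = " ++ PySem.Int.toStr r ++ ".")
                :: contraAlt j r (ind ++ "  "))) := by
  have hpos : 0 < ms.length := List.length_pos_iff.mpr hms
  obtain ⟨L, hL⟩ : ∃ L, ms.length = L + 1 := ⟨ms.length - 1, by omega⟩
  have hlen2 : (ms ++ [r]).length = (L + 1) + 1 := by simp [hL]
  have hget00 : PySem.List.pyGetD (ms ++ [r]) 0 0 = PySem.List.pyGetD ms 0 0 := by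
    obtain ⟨m, t, rfl⟩ := List.exists_cons_of_ne_nil hms
    simp [PySem.List.pyGetD_zero_cons]
  have hbm : lvl + ((L + 1 + 1 : Nat) : Int) - 1 = (lvl + 1) + ((L + 1 : Nat) : Int) - 1 := by
    push_cast; ring
  rw [alt_eq j (ms ++ [r]) ind lvl (by simp), alt_eq j ms (ind ++ "  ") (lvl + 1) hms]
  simp only [hlen2, hL, Nat.add_sub_cancel]
  rw [spineL ind lvl L, spineR j r ms ind lvl L hL]
  simp only [rep2_succ, hbm, hget00, String.append_assoc, List.append_assoc, List.cons_append,
    List.nil_append]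

-- A's recursion on neighbors[:-1] equals B's two index loops
theorem A_eq_alt (nb : List Int) : ∀ (j : Int) (ind : String) (lvl : Int), nb ≠ [] →
    gen_inner_j_or_elim j nb ind lvl = gen_inner_j_or_elim_alt j nb ind lvl := by
  induction nb using List.reverseRecOn with
  | nil => intro j ind lvl h; exact absurd rfl h
  | append_singleton ms r ih =>
    intro j ind lvl _
    by_cases hms : ms = []
    · subst hms
      rw [gen_inner_j_or_elim]
      simp only [List.nil_append]
      rw [alt_single]
      simp [bulletAlt, PySem.List.pyGetD_zero_cons, contra_eq]
    · have hlen : ¬ ((ms ++ [r]).length = 1) := by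
        have := List.length_pos_iff.mpr hms
        simp only [List.length_append, List.length_cons, List.length_nil]
        omega
      rw [gen_inner_j_or_elim]
      simp only [if_neg hlen]
      split
      · next h =>
        rw [PySem.List.pyGet?_neg_one_append_singleton] at h
        exact absurd h (by simp)
      · next right h =>
        rw [PySem.List.pyGet?_neg_one_append_singleton] at h
        have hr : r = right := by injection h
        subst hr
        simp only [PySem.List.slice_to_neg_one, List.dropLast_concat]
        rw [ih j (ind ++ "  ") (lvl + 1) hms, contra_eq, alt_step j r ms ind lvl hms]
        simp [bulletAlt]

-- ===== VERDICT (by name: the statement is the Claim_ definition above) =====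
theorem gen_inner_j_or_elim_spec : Claim_equal_gen_inner_j_or_elim := by
  intro vertex_j neighbors indent level _ hpre
  unfold Spec_gen_inner_j_or_elim
  exact A_eq_alt neighbors vertex_j indent level hpre
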